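-- pv_equiv track=rewrite | github.com/alclass/PyMirrorFileSystemsByHash | fs/strnlistfs/listfunctions_mod.py | remove_larger_number_n_return_the_ids
-- ===== SOURCE A (Python) =====
-- def remove_larger_number_n_return_the_ids(ids_n_numbers_tuplelist):
--   if type(ids_n_numbers_tuplelist) not in [list, tuple] or len(ids_n_numbers_tuplelist) == 0:
--     return []
--   try:
--     if len(ids_n_numbers_tuplelist) == 1:
--       _id, _ = ids_n_numbers_tuplelist[0]
--       ids = [_id]
--       return ids
--     ids_n_numbers_tuplelist = sorted(ids_n_numbers_tuplelist, key=lambda x: x[1])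
--     del ids_n_numbers_tuplelist[-1]
--     ids = [tupl[0] for tupl in ids_n_numbers_tuplelist]
--     ids = sorted(ids)
--     return ids
--   except IndexError:
--     error_msg = 'IndexError: bad input data to remove_larger_number_n_return_the_ids() [%s]' \
--                 ' :: it should be a tuple list' % str(ids_n_numbers_tuplelist)
--     raise IndexError(error_msg)
-- ===== SOURCE B (Python) =====
-- def remove_larger_number_n_return_the_ids(ids_n_numbers_tuplelist):
--   if type(ids_n_numbers_tuplelist) not in [list, tuple] or len(ids_n_numbers_tuplelist) == 0:
--     return []
--   if len(ids_n_numbers_tuplelist) == 1: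
--     _id, _ = ids_n_numbers_tuplelist[0]
--     return [_id]
--   # one linear pass for the maximum number, then drop its last occurrence
--   # by scanning from the right (Python's stable sort puts that tuple last)
--   maxnum = max(n for _, n in ids_n_numbers_tuplelist)
--   ids = []
--   removed = False
--   for _id, n in reversed(ids_n_numbers_tuplelist):
--     if not removed and n == maxnum:
--       removed = True
--     else:
--       ids.append(_id)
--   return sorted(ids)
-- ===== Notes on version B (the rewrite author's own statement) =====
-- stated objective: alternative
-- what changed: Replaces A's sort-by-number-then-delete-last pass by a linear max computation plus a right-to-left scan that drops the last occurrence of the maximal number; only the final id sort remains.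
import Mathlib
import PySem

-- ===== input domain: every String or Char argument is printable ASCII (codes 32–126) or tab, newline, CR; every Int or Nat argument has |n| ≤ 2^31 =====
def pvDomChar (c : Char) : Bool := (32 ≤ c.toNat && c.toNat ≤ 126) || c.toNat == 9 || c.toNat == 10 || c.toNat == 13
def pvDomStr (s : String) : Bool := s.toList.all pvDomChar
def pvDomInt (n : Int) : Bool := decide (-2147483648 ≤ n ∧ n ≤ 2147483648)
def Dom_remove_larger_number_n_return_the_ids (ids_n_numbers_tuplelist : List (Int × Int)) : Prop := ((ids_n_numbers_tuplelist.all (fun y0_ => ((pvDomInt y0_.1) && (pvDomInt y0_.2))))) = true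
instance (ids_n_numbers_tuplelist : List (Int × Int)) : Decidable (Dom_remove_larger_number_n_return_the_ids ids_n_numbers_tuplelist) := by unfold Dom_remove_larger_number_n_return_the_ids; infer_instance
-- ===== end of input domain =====

-- B replaces A's sort-by-number + delete-last by a linear max pass and a right-to-left
-- removal of the max's last occurrence (alternative decomposition; final sort unchanged).


-- ===== PORT A =====
-- 'type(...) not in [list, tuple]' is always false for a typed List, so only the emptiness
-- test remains; inside try, xs[0] and x[1] never raise on List (Int × Int), so the except
-- branch is dead on this domain.
def remove_larger_number_n_return_the_ids (ids_n_numbers_tuplelist : List (Int × Int)) : List Int :=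
  if ids_n_numbers_tuplelist.length = 0 then []
  else if ids_n_numbers_tuplelist.length = 1 then
    [(PySem.List.pyGetD ids_n_numbers_tuplelist 0 (0, 0)).1]
  else
    let srt := PySem.List.sorted ids_n_numbers_tuplelist (fun x => x.2) false
    let srt := srt.dropLast          -- del ids_n_numbers_tuplelist[-1]
    let ids := srt.map (fun tupl => tupl.1)
    PySem.List.sorted ids (fun x => x) false

-- ===== PORT B =====
def remove_larger_number_n_return_the_ids_alt (ids_n_numbers_tuplelist : List (Int × Int)) : List Int :=
  match ids_n_numbers_tuplelist with
  | [] => []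
  | [p] => [p.1]
  | p :: rest =>
    -- maxnum = max(n for _, n in ...)
    let maxnum := rest.foldl (fun acc t => max acc t.2) p.2
    -- for _id, n in reversed(...): drop the first (from the right) tuple with n == maxnum
    let st := (p :: rest).reverse.foldl
      (fun (s : List Int × Bool) t =>
        if !s.2 && t.2 == maxnum then (s.1, true) else (s.1 ++ [t.1], s.2))
      ([], false)
    PySem.List.sorted st.1 (fun x => x) false

-- ===== PRECONDITION & SPEC =====
def Spec_remove_larger_number_n_return_the_ids (ids_n_numbers_tuplelist : List (Int × Int)) (out : List Int) : Prop := out = remove_larger_number_n_return_the_ids_alt ids_n_numbers_tuplelist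
instance (ids_n_numbers_tuplelist : List (Int × Int)) (out : List Int) : Decidable (Spec_remove_larger_number_n_return_the_ids ids_n_numbers_tuplelist out) := by unfold Spec_remove_larger_number_n_return_the_ids; infer_instance

-- ===== CLAIM (what is proved, stated in full; the proofs are below) =====
def Claim_equal_remove_larger_number_n_return_the_ids : Prop := ∀ (ids_n_numbers_tuplelist : List (Int × Int)), Dom_remove_larger_number_n_return_the_ids ids_n_numbers_tuplelist → Spec_remove_larger_number_n_return_the_ids ids_n_numbers_tuplelist (remove_larger_number_n_return_the_ids ids_n_numbers_tuplelist)

-- ===== LEMMAS AND PROOFS =====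

lemma insertBy_nil {α : Type} (before : α → α → Bool) (x : α) :
    PySem.List.insertBy before x [] = [x] := rfl

lemma insertBy_cons {α : Type} (before : α → α → Bool) (x y : α) (ys : List α) :
    PySem.List.insertBy before x (y :: ys) =
      if before x y then x :: y :: ys else y :: PySem.List.insertBy before x ys := rfl

lemma insertBy_append_last {α : Type} (before : α → α → Bool) (x t : α) (ys : List α)
    (h : before x t = true) :
    PySem.List.insertBy before x (ys ++ [t]) = PySem.List.insertBy before x ys ++ [t] := by
  induction ys with
  | nil => simp [insertBy_nil, insertBy_cons, h]
  | cons y ys ih =>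
    simp only [List.cons_append, insertBy_cons]
    by_cases hb : before x y
    · simp [hb]
    · simp [hb, ih]

lemma sorted_append_singleton {α κ : Type} [LT κ] [DecidableLT κ] (xs : List α) (x : α)
    (key : α → κ) :
    PySem.List.sorted (xs ++ [x]) key false =
      PySem.List.insertBy (fun a b => decide (key a < key b)) x (PySem.List.sorted xs key false) := by
  rw [PySem.List.sorted_eq_foldl_insertBy, PySem.List.sorted_eq_foldl_insertBy, List.foldl_append]
  rfl

-- stable sort puts the LAST maximal tuple last
lemma sorted_last_max (u v : List (Int × Int)) (t : Int × Int)
    (hu : ∀ w ∈ u, w.2 ≤ t.2) (hv : ∀ w ∈ v, w.2 < t.2) :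
    PySem.List.sorted (u ++ t :: v) (fun x => x.2) false =
      PySem.List.sorted (u ++ v) (fun x => x.2) false ++ [t] := by
  induction v using List.reverseRecOn with
  | nil =>
    rw [sorted_append_singleton, List.append_nil]
    apply PySem.List.insertBy_of_forall_not_before
    intro y hy
    have hyu : y ∈ u := (PySem.List.mem_sorted _ _ _ _).mp hy
    simpa using not_lt.mpr (hu y hyu)
  | append_singleton v' w ih =>
    have hw : w.2 < t.2 := hv w (by simp)
    have h1 : u ++ t :: (v' ++ [w]) = (u ++ t :: v') ++ [w] := by simp
    rw [h1, sorted_append_singleton,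
        ih (fun x hx => hv x (by simp [hx])),
        insertBy_append_last _ _ _ _ (by simpa using hw),
        ← sorted_append_singleton]
    simp

lemma exists_last_satisfying {α : Type} (p : α → Prop) [DecidablePred p] (xs : List α)
    (h : ∃ x ∈ xs, p x) : ∃ u t v, xs = u ++ t :: v ∧ p t ∧ ∀ w ∈ v, ¬ p w := by
  induction xs with
  | nil => simp at h
  | cons x xs ih =>
    by_cases hx : ∃ y ∈ xs, p y
    · obtain ⟨u, t, v, hsplit, hpt, hv⟩ := ih hx
      exact ⟨x :: u, t, v, by simp [hsplit], hpt, hv⟩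
    · have hpx : p x := by
        rcases h with ⟨y, hy, hpy⟩
        rcases List.mem_cons.mp hy with rfl | hy'
        · exact hpy
        · exact absurd ⟨y, hy', hpy⟩ hx
      exact ⟨[], x, xs, rfl, hpx, fun w hw hpw => hx ⟨w, hw, hpw⟩⟩

-- B's right-to-left loop once the removal has already happened
lemma fold_removed (m : Int) (l : List (Int × Int)) (acc : List Int) :
    l.foldl
      (fun (s : List Int × Bool) t =>
        if !s.2 && t.2 == m then (s.1, true) else (s.1 ++ [t.1], s.2))
      (acc, true)
    = (acc ++ l.map Prod.fst, true) := by
  induction l generalizing acc with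
  | nil => simp
  | cons x l ih =>
    simp only [List.foldl_cons, Bool.not_true, Bool.false_and, Bool.false_eq_true, if_false, ih]
    simp

-- B's right-to-left loop while no tuple carries the max
lemma fold_active (m : Int) (l : List (Int × Int)) (acc : List Int)
    (h : ∀ w ∈ l, w.2 ≠ m) :
    l.foldl
      (fun (s : List Int × Bool) t =>
        if !s.2 && t.2 == m then (s.1, true) else (s.1 ++ [t.1], s.2))
      (acc, false)
    = (acc ++ l.map Prod.fst, false) := by
  induction l generalizing acc with
  | nil => simp
  | cons x l ih =>
    have hx : x.2 ≠ m := h x (by simp)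
    simp only [List.foldl_cons, Bool.not_false, Bool.true_and, beq_iff_eq, hx,
      reduceIte]
    rw [ih _ (fun w hw => h w (by simp [hw]))]
    simp

-- the running max over the tail is the max of all the numbers, and is attained
lemma max_spec (p : Int × Int) (rest : List (Int × Int)) :
    (∀ x ∈ p :: rest, x.2 ≤ rest.foldl (fun acc t => max acc t.2) p.2) ∧
      (∃ x ∈ p :: rest, x.2 = rest.foldl (fun acc t => max acc t.2) p.2) := by
  have hrw : rest.foldl (fun acc t => max acc t.2) p.2
      = (rest.map Prod.snd).foldl max p.2 := by rw [List.foldl_map]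
  constructor
  · intro x hx
    rcases List.mem_cons.mp hx with rfl | hx'
    · rw [hrw]; exact (PySem.List.le_foldl_max _ _).1
    · rw [hrw]
      exact (PySem.List.le_foldl_max (rest.map Prod.snd) p.2).2 x.2 (List.mem_map_of_mem hx')
  · rw [hrw]
    rcases PySem.List.foldl_max_mem (rest.map Prod.snd) p.2 with h | h
    · exact ⟨p, by simp, h.symm⟩
    · rcases List.mem_map.mp h with ⟨x, hx, hx2⟩
      exact ⟨x, by simp [hx], hx2⟩

-- ===== VERDICT (by name: the statement is the Claim_ definition above) =====
theorem remove_larger_number_n_return_the_ids_spec : Claim_equal_remove_larger_number_n_return_the_ids := by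
  intro xs _
  unfold Spec_remove_larger_number_n_return_the_ids
  match xs with
  | [] => rfl
  | [p] => rfl
  | p :: q :: rest =>
    obtain ⟨hmax, hmem⟩ := max_spec p (q :: rest)
    obtain ⟨u, t, v, hsplit, htm, hv⟩ :=
      exists_last_satisfying (fun x => x.2 = (q :: rest).foldl (fun acc t => max acc t.2) p.2)
        (p :: q :: rest) hmem
    -- A's value
    have hsort : PySem.List.sorted (p :: q :: rest) (fun x => x.2) false =
        PySem.List.sorted (u ++ v) (fun x => x.2) false ++ [t] := by
      rw [hsplit]
      apply sorted_last_max
      · intro w hw; rw [htm]; exact hmax w (by rw [hsplit]; simp [hw])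
      · intro w hw
        have hle : w.2 ≤ (q :: rest).foldl (fun acc t => max acc t.2) p.2 :=
          hmax w (by rw [hsplit]; simp [hw])
        have hne := hv w hw
        omega
    have hA : remove_larger_number_n_return_the_ids (p :: q :: rest) =
        PySem.List.sorted
          ((PySem.List.sorted (u ++ v) (fun x => x.2) false).map (fun tupl => tupl.1))
          (fun x => x) false := by
      unfold remove_larger_number_n_return_the_ids
      rw [if_neg (by simp), if_neg (by simp)]
      simp only [hsort, List.dropLast_concat]
    -- B's value
    have hB : remove_larger_number_n_return_the_ids_alt (p :: q :: rest) =
        PySem.List.sorted (v.reverse.map Prod.fst ++ u.reverse.map Prod.fst)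
          (fun x => x) false := by
      show PySem.List.sorted
          ((p :: q :: rest).reverse.foldl
            (fun (s : List Int × Bool) t =>
              if !s.2 && t.2 == (q :: rest).foldl (fun acc t => max acc t.2) p.2
              then (s.1, true) else (s.1 ++ [t.1], s.2))
            ([], false)).1 (fun x => x) false = _
      have hrev : (p :: q :: rest).reverse = v.reverse ++ t :: u.reverse := by
        rw [hsplit]; simp
      rw [hrev, List.foldl_append,
          fold_active _ v.reverse [] (fun w hw => hv w (by simpa using hw)),
          List.foldl_cons]
      simp only [Bool.not_false, Bool.true_and, htm, beq_self_eq_true, if_true]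
      rw [fold_removed]
      simp
    rw [hA, hB, PySem.List.sorted_id_eq_sorted_id_iff_perm]
    refine List.Perm.trans
      ((PySem.List.sorted_perm (u ++ v) (fun x => x.2) false).map (fun tupl => tupl.1)) ?_
    have hmaps : (u ++ v).map (fun tupl : Int × Int => tupl.1)
        = u.map Prod.fst ++ v.map Prod.fst := by simp
    rw [hmaps]
    exact List.perm_append_comm.trans
      (List.Perm.append ((v.reverse_perm.map Prod.fst).symm)
        ((u.reverse_perm.map Prod.fst).symm))
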